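-- pv_equiv track=rewrite | github.com/jcolinpatrick/kryptos | scripts/geometric_null_mask_part2.py | crib_score_free
-- ===== SOURCE A (Python) =====
-- def crib_score_free(pt, cribs=("EASTNORTHEAST", "BERLINCLOCK")):
--     """Search for cribs anywhere in plaintext. Return (score, positions)."""
--     total = 0
--     found = []
--     for crib in cribs:
--         for i in range(len(pt) - len(crib) + 1):
--             if pt[i:i+len(crib)] == crib:
--                 total += len(crib)
--                 found.append((crib, i))
--     return total, found
-- ===== SOURCE B (Python) =====
-- def crib_score_free(pt, cribs=("EASTNORTHEAST", "BERLINCLOCK")):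
--     """Search for cribs anywhere in plaintext. Return (score, positions)."""
--     total = 0
--     found = []
--     for crib in cribs:
--         j = pt.find(crib)
--         while j != -1:
--             total += len(crib)
--             found.append((crib, j))
--             j = pt.find(crib, j + 1)
--     return total, found
-- ===== Notes on version B (the rewrite author's own statement) =====
-- stated objective: faster
-- what changed: A slices and compares the plaintext at every start index for each crib; B instead repeatedly calls str.find, jumping directly from one occurrence to the next so non-matching positions are skipped by the C-level substring search.
import Mathlib
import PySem

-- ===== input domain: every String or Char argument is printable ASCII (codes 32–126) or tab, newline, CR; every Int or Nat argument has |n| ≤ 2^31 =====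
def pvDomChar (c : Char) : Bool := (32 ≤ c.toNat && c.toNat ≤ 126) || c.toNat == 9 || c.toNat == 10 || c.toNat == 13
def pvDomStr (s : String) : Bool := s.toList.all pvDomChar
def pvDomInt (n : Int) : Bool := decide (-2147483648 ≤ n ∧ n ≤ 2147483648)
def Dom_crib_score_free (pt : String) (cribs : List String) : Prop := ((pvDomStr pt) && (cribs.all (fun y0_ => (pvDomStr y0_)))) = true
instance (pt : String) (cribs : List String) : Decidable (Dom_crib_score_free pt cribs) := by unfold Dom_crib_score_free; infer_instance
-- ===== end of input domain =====

-- B replaces A's per-index slice comparison by a str.find loop that jumps from one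
-- occurrence to the next (objective: faster — find skips non-matching positions).

-- ===== PORT A =====
-- literal port of A: for each crib, scan every start index i and compare the slice.
def crib_score_free (pt : String) (cribs : List String) : Int × (List (String × Int)) :=
  cribs.foldl
    (fun acc crib =>
      (PySem.List.pyRange 0 (PySem.Str.len pt - PySem.Str.len crib + 1) 1).foldl
        (fun acc2 i =>
          if PySem.Str.slice pt (some i) (some (i + PySem.Str.len crib)) = crib then
            (acc2.1 + PySem.Str.len crib, acc2.2 ++ [(crib, i)])
          else acc2)
        acc)
    (0, [])

-- ===== PORT B =====
-- helper needed by the port's termination proof: find past the end of the string is -1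
theorem pvFindFrom_past (s sub : List Char) (k : Int) (hk : (s.length : Int) < k) :
    PySem.Chars.findFrom s sub k none = -1 := by
  simp only [PySem.Chars.findFrom]
  have h0 : ¬ k < 0 := by omega
  simp [h0, hk]

-- helper for the port's termination proof: a successful find lands between start and end
theorem pvFindFrom_bounds (s sub : List Char) (k : Nat)
    (h : PySem.Chars.findFrom s sub (k : Int) none ≠ -1) :
    (k : Int) ≤ PySem.Chars.findFrom s sub (k : Int) none ∧
      PySem.Chars.findFrom s sub (k : Int) none ≤ (s.length : Int) := by
  by_cases hk : k ≤ s.length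
  · rw [PySem.Chars.findFrom_natCast s sub k hk] at h ⊢
    split at h
    · exact absurd rfl h
    · rename_i hf
      have h1 : -1 ≤ PySem.Chars.find (List.drop k s) sub := PySem.Chars.neg_one_le_find _ _
      have h2 : PySem.Chars.find (List.drop k s) sub ≤ ((List.drop k s).length : Int) :=
        PySem.Chars.find_le_length _ _
      simp only [hf, if_false]
      rw [List.length_drop] at h2
      omega
  · exact absurd (pvFindFrom_past s sub k (by omega)) h

-- port of B's while loop: j = pt.find(crib, start); while j != -1: record j, restart at j+1
def pvWhileB (ptL cL : List Char) (crib : String) (total : Int)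
    (found : List (String × Int)) (start : Nat) : Int × (List (String × Int)) :=
  if hj : PySem.Chars.findFrom ptL cL (start : Int) none = -1 then (total, found)
  else
    pvWhileB ptL cL crib (total + PySem.Chars.len cL)
      (found ++ [(crib, PySem.Chars.findFrom ptL cL (start : Int) none)])
      ((PySem.Chars.findFrom ptL cL (start : Int) none).toNat + 1)
termination_by ptL.length + 1 - start
decreasing_by
  have hb := pvFindFrom_bounds ptL cL start hj
  omega

-- literal port of YOUR B (Source B)
def crib_score_free_alt (pt : String) (cribs : List String) : Int × (List (String × Int)) :=
  cribs.foldl (fun acc crib => pvWhileB pt.toList crib.toList crib acc.1 acc.2 0) (0, [])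

-- ===== PRECONDITION & SPEC =====
def Spec_crib_score_free (pt : String) (cribs : List String) (out : Int × (List (String × Int))) : Prop := out = crib_score_free_alt pt cribs
instance (pt : String) (cribs : List String) (out : Int × (List (String × Int))) : Decidable (Spec_crib_score_free pt cribs out) := by unfold Spec_crib_score_free; infer_instance

-- ===== CLAIM (what is proved, stated in full; the proofs are below) =====
def Claim_equal_crib_score_free : Prop := ∀ (pt : String) (cribs : List String), Dom_crib_score_free pt cribs → Spec_crib_score_free pt cribs (crib_score_free pt cribs)

-- ===== LEMMAS AND PROOFS =====

-- output entries for one crib from a list of occurrence indices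
def pvOut (crib : String) (l : List Nat) : List (String × Int) :=
  l.map (fun i => (crib, (i : Int)))

theorem pvOut_cons (crib : String) (x : Nat) (l : List Nat) :
    pvOut crib (x :: l) = (crib, (x : Int)) :: pvOut crib l := rfl

theorem pvOut_nil (crib : String) : pvOut crib [] = [] := rfl

-- the occurrence indices of c in s, in increasing order
def pvOcc (s c : List Char) : List Nat :=
  (List.range (s.length + 1 - c.length)).filter (fun i => decide (c <+: s.drop i))

-- generic shape of A's inner loop over a list of candidate indices
theorem pvFoldOcc (crib : String) (mI : Int) (P : Nat → Bool) :
    ∀ (l : List Nat) (acc : Int × (List (String × Int))),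
      l.foldl (fun a i => if P i then (a.1 + mI, a.2 ++ [(crib, (i : Int))]) else a) acc
        = (acc.1 + mI * ((l.filter P).length : Int),
           acc.2 ++ pvOut crib (l.filter P)) := by
  intro l
  induction l with
  | nil => intro acc; simp [pvOut_nil]
  | cons x xs ih =>
    intro acc
    by_cases hx : P x
    · simp only [List.foldl_cons, List.filter_cons, hx, if_true, ih]
      simp only [List.length_cons, pvOut_cons, Prod.mk.injEq]
      refine ⟨by push_cast; ring, by simp⟩
    · simp [List.foldl_cons, hx, ih]

-- splitting a sorted index list at its first element ≥ start
theorem pvFilterSplit (j start : Nat) :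
    ∀ (l : List Nat), l.Pairwise (· < ·) → j ∈ l → start ≤ j →
      (∀ i ∈ l, start ≤ i → j ≤ i) →
      l.filter (fun i => decide (start ≤ i)) = j :: l.filter (fun i => decide (j + 1 ≤ i)) := by
  intro l
  induction l with
  | nil => intro _ hj; exact absurd hj (List.not_mem_nil)
  | cons x xs ih =>
    intro hp hj hstart hmin
    rcases List.mem_cons.mp hj with rfl | hj'
    · have hall : ∀ i ∈ xs, j < i := fun i hi => (List.pairwise_cons.mp hp).1 i hi
      have h1 : xs.filter (fun i => decide (start ≤ i)) = xs :=
        List.filter_eq_self.mpr (fun i hi => decide_eq_true (by have := hall i hi; omega))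
      have h2 : xs.filter (fun i => decide (j + 1 ≤ i)) = xs :=
        List.filter_eq_self.mpr (fun i hi => decide_eq_true (by have := hall i hi; omega))
      rw [List.filter_cons, List.filter_cons]
      simp [hstart, h1]
      exact (List.filter_eq_self.mpr (fun i hi => decide_eq_true (hall i hi))).symm
    · have hxj : x < j := (List.pairwise_cons.mp hp).1 j hj'
      have hx : ¬ start ≤ x := by
        intro hsx
        have := hmin x (List.mem_cons_self) hsx
        omega
      have hrec := ih (List.pairwise_cons.mp hp).2 hj' hstart
        (fun i hi hsi => hmin i (List.mem_cons_of_mem x hi) hsi)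
      rw [List.filter_cons_of_neg (by simpa using hx), hrec,
        List.filter_cons_of_neg (by simp; omega)]

-- characterisation of B's while loop
theorem pvWhileB_eq (s c : List Char) (crib : String) :
    ∀ (total : Int) (found : List (String × Int)) (start : Nat),
      pvWhileB s c crib total found start
        = (total + (c.length : Int) * (((pvOcc s c).filter (fun i => decide (start ≤ i))).length : Int),
           found ++ pvOut crib ((pvOcc s c).filter (fun i => decide (start ≤ i)))) := by
  intro total found start
  fun_induction pvWhileB with
  | case1 total found start hj =>
      have hempty : (pvOcc s c).filter (fun i => decide (start ≤ i)) = [] := by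
        rw [List.filter_eq_nil_iff]
        intro i hi hdec
        have hsi : start ≤ i := of_decide_eq_true hdec
        have hiP : c <+: s.drop i := of_decide_eq_true (List.mem_filter.mp hi).2
        have hiN := List.mem_range.mp (List.mem_filter.mp hi).1
        by_cases hk : start ≤ s.length
        · have hninf : ¬ c <:+: s.drop start :=
            (PySem.Chars.findFrom_natCast_eq_neg_one_iff s c start hk).mp hj
          apply hninf
          have hd : s.drop i = (s.drop start).drop (i - start) := by
            rw [List.drop_drop]; congr 1; omega
          rw [hd] at hiP
          exact hiP.isInfix.trans (List.drop_suffix _ _).isInfix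
        · omega
      simp [hempty, pvOut_nil]
  | case2 total found start hj ih =>
      have hk : start ≤ s.length := by
        by_contra hk
        exact hj (pvFindFrom_past s c start (by omega))
      obtain ⟨hj1, hj2, hj3⟩ := PySem.Chars.findFrom_natCast_spec s c start hk hj
      have hjle : PySem.Chars.findFrom s c (start : Int) none ≤ (s.length : Int) :=
        (pvFindFrom_bounds s c start hj).2
      set j : Int := PySem.Chars.findFrom s c (start : Int) none with hjdef
      clear_value j
      have hj0 : 0 ≤ j := le_trans (by exact_mod_cast Nat.zero_le start) hj1
      have hjn : (j.toNat : Int) = j := Int.toNat_of_nonneg hj0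
      have hstartle : start ≤ j.toNat := by omega
      have hjlen : j.toNat ≤ s.length := by omega
      have hmlen : c.length + j.toNat ≤ s.length := by
        have := hj2.length_le
        rw [List.length_drop] at this
        omega
      have hjmem : j.toNat ∈ pvOcc s c :=
        List.mem_filter.mpr ⟨List.mem_range.mpr (by omega), decide_eq_true hj2⟩
      have hsplit : (pvOcc s c).filter (fun i => decide (start ≤ i))
          = j.toNat :: (pvOcc s c).filter (fun i => decide (j.toNat + 1 ≤ i)) := by
        apply pvFilterSplit j.toNat start (pvOcc s c)
          (List.Pairwise.filter _ List.pairwise_lt_range) hjmem hstartle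
        intro i hi hsi
        by_contra hlt
        rw [Nat.not_le] at hlt
        exact hj3 i hsi hlt (of_decide_eq_true (List.mem_filter.mp hi).2)
      rw [ih, hsplit]
      simp only [List.length_cons, pvOut_cons, PySem.Chars.len_eq, Prod.mk.injEq]
      refine ⟨by push_cast; ring, ?_⟩
      rw [hjn]
      simp

-- A's inner loop for one crib equals B's while loop from start 0
theorem pvInner_eq (pt : String) (crib : String) (acc : Int × (List (String × Int))) :
    (PySem.List.pyRange 0 (PySem.Str.len pt - PySem.Str.len crib + 1) 1).foldl
      (fun acc2 i =>
        if PySem.Str.slice pt (some i) (some (i + PySem.Str.len crib)) = crib then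
          (acc2.1 + PySem.Str.len crib, acc2.2 ++ [(crib, i)])
        else acc2) acc
      = pvWhileB pt.toList crib.toList crib acc.1 acc.2 0 := by
  set s := pt.toList with hs
  set c := crib.toList with hc
  set N : Nat := s.length + 1 - c.length with hN
  set e : Int := PySem.Str.len pt - PySem.Str.len crib + 1 with hedef
  have hE : e = (s.length : Int) - (c.length : Int) + 1 := by
    rw [hedef, PySem.Str.len_eq, PySem.Str.len_eq]
  -- the Python range is the Nat range of length N
  have hrange : PySem.List.pyRange 0 e 1 = (List.range N).map (Nat.cast : Nat → Int) := by
    rw [PySem.List.pyRange_of_pos _ _ (by norm_num)]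
    have hcnt : (if (0 : Int) < e then ((e - 0 + 1 - 1) / 1).toNat else 0) = N := by
      simp only [Int.sub_zero, add_sub_cancel_right, Int.ediv_one, hE]
      split <;> omega
    rw [hcnt]
    apply List.map_congr_left
    intro k _
    ring
  rw [hrange, List.foldl_map]
  -- the slice test is the prefix test
  have hcond : ∀ k : Nat,
      (PySem.Str.slice pt (some (k : Int)) (some ((k : Int) + PySem.Str.len crib)) = crib)
        ↔ ((fun i => decide (c <+: s.drop i)) k = true) := by
    intro k
    rw [← String.toList_inj, PySem.Str.toList_slice, PySem.Chars.slice_eq_listSlice,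
      PySem.Str.len_eq, PySem.List.slice_natCast_add]
    simp only [decide_eq_true_iff, ← hs, ← hc]
    constructor
    · intro h
      rw [List.prefix_iff_eq_take]
      exact h.symm
    · intro h
      exact (List.prefix_iff_eq_take.mp h).symm
  rw [PySem.List.foldl_congr_mem (List.range N) _
    (fun a k => if (fun i => decide (c <+: s.drop i)) k then
      (a.1 + PySem.Str.len crib, a.2 ++ [(crib, (k : Int))]) else a) acc
    (by
      intro a k _
      by_cases h : PySem.Str.slice pt (some (k : Int)) (some ((k : Int) + PySem.Str.len crib)) = crib
      · rw [if_pos h]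
        exact (if_pos ((hcond k).mp h)).symm
      · rw [if_neg h]
        exact (if_neg (fun hcc => h ((hcond k).mpr hcc))).symm)]
  rw [pvFoldOcc crib (PySem.Str.len crib) (fun i => decide (c <+: s.drop i)) (List.range N) acc]
  rw [pvWhileB_eq s c crib acc.1 acc.2 0]
  have h0 : (pvOcc s c).filter (fun i => decide (0 ≤ i)) = pvOcc s c :=
    List.filter_eq_self.mpr (fun i _ => decide_eq_true (Nat.zero_le i))
  rw [h0]
  unfold pvOcc
  rw [PySem.Str.len_eq, ← hN]

-- fold the per-crib equality through the outer loop over the cribs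
theorem pvFoldCribs (pt : String) :
    ∀ (l : List String) (acc : Int × (List (String × Int))),
      l.foldl
        (fun acc crib =>
          (PySem.List.pyRange 0 (PySem.Str.len pt - PySem.Str.len crib + 1) 1).foldl
            (fun acc2 i =>
              if PySem.Str.slice pt (some i) (some (i + PySem.Str.len crib)) = crib then
                (acc2.1 + PySem.Str.len crib, acc2.2 ++ [(crib, i)])
              else acc2)
            acc) acc
        = l.foldl (fun acc crib => pvWhileB pt.toList crib.toList crib acc.1 acc.2 0) acc := by
  intro l
  induction l with
  | nil => intro acc; rfl
  | cons crib rest ih =>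
    intro acc
    simp only [List.foldl_cons]
    rw [pvInner_eq pt crib acc]
    exact ih _

-- ===== VERDICT (by name: the statement is the Claim_ definition above) =====
theorem crib_score_free_spec : Claim_equal_crib_score_free := by
  intro pt cribs _
  unfold Spec_crib_score_free crib_score_free crib_score_free_alt
  exact pvFoldCribs pt cribs (0, [])
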